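-- pv_equiv track=rewrite | github.com/jonrosenberg/adventofcode | 2023/Day07/a.py | encode_hand_to_int
-- ===== SOURCE A (Python) =====
-- def card_value(card, p2=False):
--     if p2:
--        return "J23456789TQKA".index(card)
--     else:
--       return "23456789TJQKA".index(card)
--
-- def encode_hand_to_int(hand:str, p2=False):
--     encode_hand = 0
--     counts = {card: hand.count(card) for card in set(hand)}
--
--     if p2 and 'J' in counts.keys() and counts['J'] != 5:
--       num_j = counts.pop('J')
--       max_key = max(counts, key=counts.get)
--       counts[max_key] += num_j
--
--     if 5 in counts.values():
--         encode_hand += 6*10**12  # Five of a kind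
--     elif 4 in counts.values():
--         encode_hand += 5*10**12  # Four of a kind
--     elif 3 in counts.values() and 2 in counts.values():
--         encode_hand += 4*10**12  # Full house
--     elif 3 in counts.values():
--         encode_hand += 3*10**12  # Three of a kind
--     elif list(counts.values()).count(2) == 2:
--         encode_hand += 2*10**12  # Two pair
--     elif 2 in counts.values():
--         encode_hand += 1*10**12  # One pair
--     else:
--         encode_hand += 0*10**12  # High card
--
--     for i, card in enumerate(hand):
--         encode_hand += card_value(card,p2)*100**(len(hand)-i-1)
--     return encode_hand
-- ===== SOURCE B (Python) =====
-- def encode_hand_to_int(hand: str, p2=False):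
--     # No dict of counts: sort the hand and read the group sizes as run lengths
--     # of the sorted list; merge the joker run by plain list surgery; emit the
--     # card digits with a Horner fold over a precomputed value table.
--     order = "J23456789TQKA" if p2 else "23456789TJQKA"
--     val = {c: i for i, c in enumerate(order)}
--     s = sorted(hand)
--     runs = []
--     j = 0
--     i = 0
--     while i < len(s):
--         k = i + 1
--         while k < len(s) and s[k] == s[i]:
--             k += 1
--         runs.append(k - i)
--         if s[i] == 'J':
--             j = k - i
--         i = k
--     if p2 and j != 0 and j != 5:
--         runs.remove(j)
--         m = max(runs)  # ValueError on an all-joker hand, like A's max over the empty dict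
--         runs[runs.index(m)] = m + j
--     if 5 in runs:
--         rank = 6
--     elif 4 in runs:
--         rank = 5
--     elif 3 in runs and 2 in runs:
--         rank = 4
--     elif 3 in runs:
--         rank = 3
--     elif runs.count(2) == 2:
--         rank = 2
--     elif 2 in runs:
--         rank = 1
--     else:
--         rank = 0
--     code = 0
--     for c in hand:
--         code = code * 100 + val[c]
--     return rank * 10**12 + code
-- ===== Notes on version B (the rewrite author's own statement) =====
-- stated objective: alternative
-- what changed: B builds no dict of counts: it sorts the hand and reads the group sizes off as run lengths of the sorted list (index while-loops), merges the jokers by list surgery on that runs list (remove the joker run, add j to the maximum), and emits the card digits with a Horner fold over a precomputed card-value table — vs A's per-distinct-card str.count dict comprehension, dict pop/argmax surgery and per-position 100**k powers with str.index.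
import Mathlib
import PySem

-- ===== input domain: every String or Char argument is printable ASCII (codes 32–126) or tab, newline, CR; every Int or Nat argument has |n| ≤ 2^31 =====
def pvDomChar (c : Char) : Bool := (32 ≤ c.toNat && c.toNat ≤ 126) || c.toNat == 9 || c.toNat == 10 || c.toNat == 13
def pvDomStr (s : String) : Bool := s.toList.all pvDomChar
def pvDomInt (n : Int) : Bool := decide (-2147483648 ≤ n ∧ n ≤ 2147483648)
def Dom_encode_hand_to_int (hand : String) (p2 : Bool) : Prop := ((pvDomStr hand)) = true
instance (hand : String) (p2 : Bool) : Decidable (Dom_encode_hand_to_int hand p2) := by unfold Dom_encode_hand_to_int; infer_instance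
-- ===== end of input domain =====

-- B builds no dict of counts: it sorts the hand and reads the group sizes as run lengths of
-- the sorted list, merges the jokers by list surgery on the runs list, and emits the card
-- digits with a Horner fold over a value table (vs A's per-card str.count dict comprehension,
-- dict pop/argmax surgery and per-position 100**k powers with str.index).

-- ===== PORT A =====
-- card_value: "….index(card)" — none = ValueError (card not a card), excluded by Pre_; .getD 0 unreachable there
def cardValueA (card : Char) (p2 : Bool) : Int :=
  if p2 then ((PySem.List.index? "J23456789TQKA".toList card).getD 0 : Nat)
  else ((PySem.List.index? "23456789TJQKA".toList card).getD 0 : Nat)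

-- counts = {card: hand.count(card) for card in set(hand)}.  Python iterates set(hand) in hash
-- order, which PySem does not model; the returned int does not depend on that order (the dict is
-- only used through its value multiset), so first-occurrence order is an exact port of the result.
def countsA (cs : List Char) : PySem.Dict Char Int :=
  (PySem.Set.ofList cs).foldl (fun d card => d.insert card ((cs.count card : Int))) PySem.Dict.empty

-- the p2 J-merge block: pop 'J', add its count to the (first) key of maximal count.
-- max() over the empty dict raises ValueError (all-J p2 hand with count ≠ 5) — excluded by Pre_;
-- ties in max are hash-order dependent in Python, but any maximal key yields the same value multiset.
def mergeA (counts : PySem.Dict Char Int) (p2 : Bool) : PySem.Dict Char Int :=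
  if p2 && counts.contains 'J' && !(counts.getD 'J' 0 == 5) then
    match counts.pop? 'J' with
    | some (numJ, d) =>
        match PySem.List.max? d.keys (fun k => d.getD k 0) with
        | some maxKey => d.modify maxKey 0 (· + numJ)
        | none => d
    | none => counts
  else counts

-- the if/elif cascade over counts.values()
def typeScoreA (vals : List Int) : Int :=
  if (5 : Int) ∈ vals then 6 * 10 ^ 12
  else if (4 : Int) ∈ vals then 5 * 10 ^ 12
  else if (3 : Int) ∈ vals ∧ (2 : Int) ∈ vals then 4 * 10 ^ 12
  else if (3 : Int) ∈ vals then 3 * 10 ^ 12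
  else if vals.count 2 == 2 then 2 * 10 ^ 12
  else if (2 : Int) ∈ vals then 1 * 10 ^ 12
  else 0 * 10 ^ 12

def encode_hand_to_int (hand : String) (p2 : Bool) : Int :=
  let cs := hand.toList
  let counts := mergeA (countsA cs) p2
  (PySem.List.enumerate cs 0).foldl
    (fun acc p => acc + cardValueA p.2 p2 * 100 ^ (((cs.length : Int)) - p.1 - 1).toNat)
    (typeScoreA counts.values)

-- ===== PORT B =====
-- val = {c: i for i, c in enumerate(order)}
def valDictB (order : List Char) : PySem.Dict Char Int :=
  (PySem.List.enumerate order 0).foldl (fun d p => d.insert p.2 p.1) PySem.Dict.empty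

-- the two index while-loops over the sorted hand: each step consumes one maximal run
-- (k - i = 1 + length of the equal stretch after position i) and records the joker run
def scanRuns : List Char → List Int × Int
  | [] => ([], (0 : Int))
  | x :: t =>
      let run : Int := 1 + ((t.takeWhile (fun c => c == x)).length : Int)
      let res := scanRuns (t.dropWhile (fun c => c == x))
      (run :: res.1, if x == 'J' then run else res.2)
  termination_by l => l.length
  decreasing_by
    simp only [List.length_cons]
    exact Nat.lt_succ_of_le (t.dropWhile_sublist (fun c => c == x)).length_le

-- runs.remove(j); m = max(runs); runs[runs.index(m)] = m + j
-- max() raises ValueError on the empty list (all-joker p2 hand) — excluded by Pre_;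
-- the .getD 0 defaults are unreachable there (m is a member, so index? finds it)
def mergeRunsB (runs : List Int) (j : Int) (p2 : Bool) : List Int :=
  if p2 && !(j == 0) && !(j == 5) then
    match PySem.List.remove? runs j with
    | some rs =>
        let m := (PySem.List.max? rs (fun v => v)).getD 0
        rs.set ((PySem.List.index? rs m).getD 0) (m + j)
    | none => runs
  else runs

-- the rank cascade over the run lengths
def rankB (runs : List Int) : Int :=
  if (5 : Int) ∈ runs then 6
  else if (4 : Int) ∈ runs then 5
  else if (3 : Int) ∈ runs ∧ (2 : Int) ∈ runs then 4
  else if (3 : Int) ∈ runs then 3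
  else if runs.count 2 == 2 then 2
  else if (2 : Int) ∈ runs then 1
  else 0

def encode_hand_to_int_alt (hand : String) (p2 : Bool) : Int :=
  let cs := hand.toList
  let order := if p2 then "J23456789TQKA".toList else "23456789TJQKA".toList
  let val := valDictB order
  let s := PySem.List.sorted cs (fun c => c) false
  let rj := scanRuns s
  let runs := mergeRunsB rj.1 rj.2 p2
  let rank := rankB runs
  -- val[c] raises KeyError for a non-card char — excluded by Pre_; .getD 0 unreachable there
  let code := cs.foldl (fun acc c => acc * 100 + val.getD c 0) 0
  rank * 10 ^ 12 + code

-- ===== PRECONDITION & SPEC =====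
-- A raises exactly when a character is not one of the 13 cards (ValueError in card_value) or
-- when, under p2, the hand consists only of 'J's and its length is not 5 (ValueError from max()
-- over an empty dict); B raises on the same inputs (KeyError / ValueError). Pre_ excludes both.
def Pre_encode_hand_to_int (hand : String) (p2 : Bool) : Prop :=
  (hand.toList.all
    (fun c => ['2','3','4','5','6','7','8','9','T','J','Q','K','A'].contains c)) = true ∧
  ¬(p2 = true ∧ hand.toList ≠ [] ∧ hand.toList.count 'J' = hand.toList.length ∧
      hand.toList.length ≠ 5)
instance (hand : String) (p2 : Bool) : Decidable (Pre_encode_hand_to_int hand p2) := by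
  unfold Pre_encode_hand_to_int; infer_instance

def pvWitness_encode_hand_to_int : String × Bool := ("T55J5", true)

def Spec_encode_hand_to_int (hand : String) (p2 : Bool) (out : Int) : Prop := out = encode_hand_to_int_alt hand p2
instance (hand : String) (p2 : Bool) (out : Int) : Decidable (Spec_encode_hand_to_int hand p2 out) := by unfold Spec_encode_hand_to_int; infer_instance

-- ===== CLAIM (what is proved, stated in full; the proofs are below) =====
def Claim_equal_encode_hand_to_int : Prop := ∀ (hand : String) (p2 : Bool), Dom_encode_hand_to_int hand p2 → Pre_encode_hand_to_int hand p2 → Spec_encode_hand_to_int hand p2 (encode_hand_to_int hand p2)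

-- ===== LEMMAS AND PROOFS =====

-- inserting pairwise-fresh keys appends their items
lemma foldl_insert_fresh (f : Char → Int) :
    ∀ (l : List Char) (d : PySem.Dict Char Int), l.Nodup → (∀ c ∈ l, d.contains c = false) →
      (l.foldl (fun d c => d.insert c (f c)) d).items = d.items ++ l.map (fun c => (c, f c)) := by
  intro l
  induction l with
  | nil => intro d _ _; simp
  | cons x t ih =>
      intro d hnd hfresh
      have hx : d.contains x = false := hfresh x (List.mem_cons_self)
      have ht : ∀ c ∈ t, (d.insert x (f x)).contains c = false := by
        intro c hc
        rw [PySem.Dict.contains_insert]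
        have hcx : c ≠ x := by
          intro h; subst h; exact (List.nodup_cons.mp hnd).1 hc
        simp [hcx, hfresh c (List.mem_cons_of_mem _ hc)]
      simp only [List.foldl_cons]
      rw [ih _ (List.nodup_cons.mp hnd).2 ht,
        PySem.Dict.items_insert_of_not_contains d (f x) hx]
      simp

-- A's dict comprehension builds Counter(hand)
lemma countsA_eq_counter (cs : List Char) : countsA cs = PySem.Dict.counter cs := by
  have h := foldl_insert_fresh (fun c => (cs.count c : Int)) (PySem.Set.ofList cs)
    PySem.Dict.empty (PySem.Set.nodup_ofList cs) (fun c _ => PySem.Dict.contains_empty c)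
  have hitems : (countsA cs).items = (PySem.Dict.counter cs).items := by
    show ((PySem.Set.ofList cs).foldl
        (fun d card => d.insert card ((cs.count card : Int))) PySem.Dict.empty).items = _
    rw [h, PySem.Dict.items_counter]
    simp [PySem.Dict.empty]
  cases hA : countsA cs with
  | mk itemsA =>
      cases hC : PySem.Dict.counter cs with
      | mk itemsC => rw [hA, hC] at hitems; simpa using hitems

-- Horner with a general accumulator
lemma horner_acc (v : Char → Int) :
    ∀ (l : List Char) (a : Int),
      l.foldl (fun acc c => acc * 100 + v c) a =
        a * 100 ^ l.length + l.foldl (fun acc c => acc * 100 + v c) 0 := by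
  intro l
  induction l with
  | nil => intro a; simp
  | cons x t ih =>
      intro a
      simp only [List.foldl_cons, List.length_cons]
      rw [ih (a * 100 + v x), ih (0 * 100 + v x)]
      ring

-- A's enumerate/power loop computes the Horner value shifted by the remaining positions
lemma enum_fold_eq_horner (v : Char → Int) (n : Nat) :
    ∀ (l : List Char) (i : Nat) (a : Int), i + l.length ≤ n →
      (PySem.List.enumerate l (i : Int)).foldl
          (fun acc p => acc + v p.2 * 100 ^ (((n : Int)) - p.1 - 1).toNat) a =
        a + (l.foldl (fun acc c => acc * 100 + v c) 0) * 100 ^ (n - i - l.length) := by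
  intro l
  induction l with
  | nil => intro i a _; simp [PySem.List.enumerate_nil]
  | cons x t ih =>
      intro i a hle
      rw [PySem.List.enumerate_cons]
      simp only [List.foldl_cons, List.length_cons] at *
      have hi : ((i : Int) + 1) = ((i + 1 : Nat) : Int) := by push_cast; ring
      rw [hi, ih (i + 1) _ (by omega)]
      have htn : (((n : Int)) - (i : Int) - 1).toNat = n - i - 1 := by omega
      rw [htn]
      have hsplit : n - i - 1 = t.length + (n - (i + 1) - t.length) := by omega
      rw [horner_acc v t (0 * 100 + v x), hsplit, pow_add,
        show n - i - (t.length + 1) = n - (i + 1) - t.length from by omega]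
      ring

-- the cascade is invariant under permutation; B's rank is A's cascade without the 10^12 factor
lemma typeScoreA_perm {v s : List Int} (h : v.Perm s) : typeScoreA v = typeScoreA s := by
  unfold typeScoreA
  simp only [h.mem_iff, h.count_eq]

lemma typeScore_eq_rankB {v s : List Int} (h : v.Perm s) :
    typeScoreA v = rankB s * 10 ^ 12 := by
  rw [typeScoreA_perm h]
  unfold typeScoreA rankB
  split_ifs <;> norm_num

lemma counter_values (cs : List Char) :
    (PySem.Dict.counter cs).values = (PySem.Set.ofList cs).map (fun k => (cs.count k : Int)) := by
  show (PySem.Dict.counter cs).items.map Prod.snd = _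
  rw [PySem.Dict.items_counter, List.map_map]; rfl

lemma erase_values (cs : List Char) :
    ((PySem.Dict.counter cs).erase 'J').values
      = ((PySem.Set.ofList cs).filter (fun k => !(k == 'J'))).map
          (fun k => (cs.count k : Int)) := by
  have h1 : ((PySem.Dict.counter cs).erase 'J').items
      = ((PySem.Set.ofList cs).filter (fun k => !(k == 'J'))).map
          (fun k => (k, (cs.count k : Int))) := by
    show (PySem.Dict.counter cs).items.filter _ = _
    rw [PySem.Dict.items_counter, List.filter_map]; rfl
  show ((PySem.Dict.counter cs).erase 'J').items.map Prod.snd = _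
  rw [h1, List.map_map]; rfl

-- decomposition of a nodup list at a member
lemma split_at_mem {α : Type} [DecidableEq α] {l : List α} {a : α}
    (h : a ∈ l) (hnd : l.Nodup) :
    ∃ p q, l = p ++ a :: q ∧ a ∉ p ∧ a ∉ q := by
  obtain ⟨p, q, rfl⟩ := List.append_of_mem h
  refine ⟨p, q, rfl, ?_, ?_⟩
  · intro hp
    have := List.disjoint_of_nodup_append hnd
    exact this hp List.mem_cons_self
  · have := (List.nodup_append.mp hnd).2.1
    exact (List.nodup_cons.mp this).1

-- Counter(hand).values() splits as the joker count next to the values of the erased dict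
lemma counter_erase_perm (cs : List Char) (hJ : 'J' ∈ cs) :
    (PySem.Dict.counter cs).values.Perm
      ((cs.count 'J' : Int) :: ((PySem.Dict.counter cs).erase 'J').values) := by
  have hSnd : (PySem.Set.ofList cs).Nodup := PySem.Set.nodup_ofList cs
  have hJS : 'J' ∈ PySem.Set.ofList cs := (PySem.Set.mem_ofList cs 'J').mpr hJ
  obtain ⟨PJ, QJ, hPQJ, hJP, hJQ⟩ := split_at_mem hJS hSnd
  have hfilt : (PySem.Set.ofList cs).filter (fun k => !(k == 'J')) = PJ ++ QJ := by
    rw [hPQJ, List.filter_append, List.filter_cons]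
    simp only [beq_self_eq_true, Bool.not_true, Bool.false_eq_true, if_false]
    rw [List.filter_eq_self.mpr, List.filter_eq_self.mpr]
    · intro k hk; simpa using fun h : k = 'J' => hJQ (by rw [h] at hk; exact hk)
    · intro k hk; simpa using fun h : k = 'J' => hJP (by rw [h] at hk; exact hk)
  rw [counter_values, erase_values, hfilt, hPQJ]
  simp only [List.map_append, List.map_cons]
  exact List.perm_middle

-- replacing the first occurrence of a member (list[list.index(v)] = w) is, as a multiset,
-- dropping v and adding w
lemma set_index_perm (l : List Int) (v w : Int) (hv : v ∈ l) :
    (l.set ((PySem.List.index? l v).getD 0) w).Perm (w :: l.erase v) := by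
  obtain ⟨k, hk⟩ : ∃ k, PySem.List.index? l v = some k := by
    cases h : PySem.List.index? l v with
    | none => exact absurd ((PySem.List.index?_eq_none_iff _ _).mp h) (by simpa using hv)
    | some k => exact ⟨k, rfl⟩
  obtain ⟨pre, suf, hdec, hlen, hvpre⟩ := (PySem.List.index?_eq_some_iff _ _ _).mp hk
  subst hdec
  rw [hk]
  simp only [Option.getD_some]
  have hset : (pre ++ v :: suf).set k w = pre ++ w :: suf := by
    subst hlen
    rw [List.set_append_right _ _ (le_refl _)]
    simp
  have herase : (pre ++ v :: suf).erase v = pre ++ suf := by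
    rw [List.erase_append_right _ (by simpa using hvpre)]
    simp
  rw [hset, herase]
  exact List.perm_middle

-- run lengths of a sorted list: the multiset of counts, with the joker run = the joker count
lemma scanRuns_spec : ∀ (n : Nat) (l : List Char), l.length ≤ n →
    l.Pairwise (fun a b => a ≤ b) →
    (scanRuns l).1.Perm ((PySem.Set.ofList l).map (fun c => (l.count c : Int))) ∧
    (scanRuns l).2 = (l.count 'J' : Int) := by
  intro n
  induction n with
  | zero =>
      intro l hl _
      have h0 : l = [] := List.length_eq_zero_iff.mp (by omega)
      subst h0
      simp [scanRuns]
  | succ n ih =>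
      intro l hl hp
      cases l with
      | nil => simp [scanRuns]
      | cons x t =>
          set tw := t.takeWhile (fun c => c == x) with htw
          set td := t.dropWhile (fun c => c == x) with htd
          have htdec : tw ++ td = t := List.takeWhile_append_dropWhile
          have htwx : ∀ c ∈ tw, c = x := by
            intro c hc
            have := List.mem_takeWhile_imp hc
            simpa using this
          have hpt : t.Pairwise (fun a b => a ≤ b) := (List.pairwise_cons.mp hp).2
          have hptd : td.Pairwise (fun a b => a ≤ b) :=
            hpt.sublist (t.dropWhile_sublist _)
          have hxle : ∀ c ∈ t, x ≤ c := (List.pairwise_cons.mp hp).1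
          have hxtd : x ∉ td := by
            rw [htd]
            cases hcase : t.dropWhile (fun c => c == x) with
            | nil => simp
            | cons z td' =>
                have hne : t.dropWhile (fun c => c == x) ≠ [] := by
                  rw [hcase]; simp
                have h1 := List.head_dropWhile_not (fun c => c == x) hne
                simp only [hcase, List.head_cons] at h1
                have hzx : z ≠ x := by simpa using h1
                have hzt : z ∈ t :=
                  List.Sublist.mem (by rw [hcase]; exact List.mem_cons_self)
                    (t.dropWhile_sublist _)
                have hptd' : (z :: td').Pairwise (fun a b => a ≤ b) := by
                  rw [← hcase, ← htd]; exact hptd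
                intro hmem
                rcases List.mem_cons.mp hmem with heq | hmem'
                · exact hzx heq.symm
                · have hxz : x < z := lt_of_le_of_ne (hxle z hzt) (Ne.symm hzx)
                  exact absurd ((List.pairwise_cons.mp hptd').1 x hmem')
                    (not_le.mpr hxz)
          have hcx : (x :: t).count x = tw.length + 1 := by
            rw [← htdec, List.count_cons_self, List.count_append]
            rw [List.count_eq_length.mpr (fun b hb => (htwx b hb).symm),
              List.count_eq_zero.mpr hxtd]
          have hcne : ∀ c, c ≠ x → (x :: t).count c = td.count c := by
            intro c hcx'
            rw [List.count_cons_of_ne (fun h => hcx' h.symm), ← htdec, List.count_append]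
            rw [List.count_eq_zero.mpr (fun hmem => hcx' (htwx c hmem))]
            omega
          have hmemiff : ∀ a, a ∈ x :: t ↔ a = x ∨ a ∈ td := by
            intro a
            constructor
            · intro h
              rcases List.mem_cons.mp h with rfl | h'
              · exact Or.inl rfl
              · rw [← htdec] at h'
                rcases List.mem_append.mp h' with h'' | h''
                · exact Or.inl (htwx a h'')
                · exact Or.inr h''
            · rintro (rfl | h')
              · exact List.mem_cons_self
              · exact List.mem_cons_of_mem _ ((t.dropWhile_sublist _).mem h')
          have hxoftd : x ∉ PySem.Set.ofList td := by
            rw [PySem.Set.mem_ofList]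
            exact hxtd
          have hpermS : (PySem.Set.ofList (x :: t)).Perm (x :: PySem.Set.ofList td) := by
            apply (List.perm_ext_iff_of_nodup (PySem.Set.nodup_ofList _)
              (List.nodup_cons.mpr ⟨hxoftd, PySem.Set.nodup_ofList _⟩)).mpr
            intro a
            have h := hmemiff a
            simp only [List.mem_cons] at h
            simp only [PySem.Set.mem_ofList, List.mem_cons]
            exact h
          have hlen : td.length ≤ n := by
            have h1 := (t.dropWhile_sublist (fun c => c == x)).length_le
            rw [← htd] at h1
            simp only [List.length_cons] at hl
            omega
          obtain ⟨ih1, ih2⟩ := ih td hlen hptd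
          have hsc : scanRuns (x :: t)
              = ((1 + (tw.length : Int)) :: (scanRuns td).1,
                 if x == 'J' then 1 + (tw.length : Int) else (scanRuns td).2) := by
            rw [scanRuns]
          have hrun : (1 + (tw.length : Int)) = (((x :: t).count x : Nat) : Int) := by
            rw [hcx]; push_cast; ring
          constructor
          · rw [hsc]
            have hmap1 : ((x :: PySem.Set.ofList td).map
                (fun c => (((x :: t).count c : Nat) : Int)))
                = (((x :: t).count x : Nat) : Int) ::
                  (PySem.Set.ofList td).map (fun c => ((td.count c : Nat) : Int)) := by
              simp only [List.map_cons]
              congr 1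
              apply List.map_congr_left
              intro c hc
              have hctd : c ∈ td := (PySem.Set.mem_ofList td c).mp hc
              have hcnex : c ≠ x := fun h => hxtd (h ▸ hctd)
              rw [hcne c hcnex]
            have h2 : ((PySem.Set.ofList (x :: t)).map
                (fun c => (((x :: t).count c : Nat) : Int))).Perm
                ((((x :: t).count x : Nat) : Int) ::
                  (PySem.Set.ofList td).map (fun c => ((td.count c : Nat) : Int))) := by
              rw [← hmap1]
              exact hpermS.map _
            refine List.Perm.trans ?_ h2.symm
            rw [← hrun]
            exact (ih1.cons _)
          · rw [hsc]
            by_cases hxJ : x = 'J'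
            · subst hxJ
              simp only [beq_self_eq_true, if_true]
              rw [hrun]
            · have hb : (x == 'J') = false := by simpa using hxJ
              rw [hb]
              simp only [Bool.false_eq_true, if_false]
              rw [ih2, hcne 'J' (fun h => hxJ h.symm)]

-- the runs of the sorted hand are exactly Counter(hand).values() as a multiset
lemma runs_perm (cs : List Char) :
    (scanRuns (PySem.List.sorted cs (fun c => c) false)).1.Perm
      (PySem.Dict.counter cs).values ∧
    (scanRuns (PySem.List.sorted cs (fun c => c) false)).2 = (cs.count 'J' : Int) := by
  set s := PySem.List.sorted cs (fun c => c) false with hs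
  have hp : s.Pairwise (fun a b => a ≤ b) := PySem.List.sorted_pairwise cs (fun c => c)
  have hsp : s.Perm cs := PySem.List.sorted_perm cs (fun c => c) false
  obtain ⟨h1, h2⟩ := scanRuns_spec s.length s (le_refl _) hp
  constructor
  · refine h1.trans ?_
    rw [counter_values]
    have hpermS : (PySem.Set.ofList s).Perm (PySem.Set.ofList cs) := by
      apply (List.perm_ext_iff_of_nodup (PySem.Set.nodup_ofList _)
        (PySem.Set.nodup_ofList _)).mpr
      intro a
      rw [PySem.Set.mem_ofList, PySem.Set.mem_ofList]
      exact hsp.mem_iff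
    have hcnt : (PySem.Set.ofList cs).map (fun c => ((s.count c : Nat) : Int))
        = (PySem.Set.ofList cs).map (fun c => ((cs.count c : Nat) : Int)) := by
      apply List.map_congr_left
      intro c _
      rw [hsp.count_eq]
    refine List.Perm.trans (hpermS.map _) ?_
    rw [hcnt]
  · rw [h2, hsp.count_eq]

-- the card-digit folds agree for cards
lemma card_digits_eq (p2 : Bool) {c : Char}
    (hc : c ∈ ['2','3','4','5','6','7','8','9','T','J','Q','K','A']) :
    cardValueA c p2 =
      (valDictB (if p2 then "J23456789TQKA".toList else "23456789TJQKA".toList)).getD c 0 := by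
  fin_cases hc <;> cases p2 <;> decide

-- A's pop/argmax joker merge, characterised as a multiset operation: one maximal value mN
-- becomes mN + count('J'), everything else survives
lemma mergeA_wild (cs : List Char) (hj0 : cs.count 'J' ≠ 0) (hj5 : cs.count 'J' ≠ 5)
    (hex : ∃ c ∈ cs, c ≠ 'J') :
    ∃ (mN : Nat) (rest : List Int),
      1 ≤ mN ∧ (∃ a ∈ cs, a ≠ 'J' ∧ mN = cs.count a) ∧
      (∀ y ∈ ((PySem.Dict.counter cs).erase 'J').values, y ≤ (mN : Int)) ∧
      ((PySem.Dict.counter cs).erase 'J').values.Perm ((mN : Int) :: rest) ∧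
      (mergeA (PySem.Dict.counter cs) true).values.Perm
        (((mN : Int) + (cs.count 'J' : Int)) :: rest) := by
  set d0 := PySem.Dict.counter cs with hd0
  set S := PySem.Set.ofList cs with hS
  have hitems0 : d0.items = S.map (fun k => (k, (cs.count k : Int))) :=
    PySem.Dict.items_counter cs
  have hJmem : 'J' ∈ cs := by rw [← List.count_pos_iff]; omega
  have hJS : 'J' ∈ S := (PySem.Set.mem_ofList cs 'J').mpr hJmem
  have hSnd : S.Nodup := PySem.Set.nodup_ofList cs
  have hcont : d0.contains 'J' = true := by
    rw [hd0, PySem.Dict.contains_counter]; simpa using hJmem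
  have hnodk : d0.keys.Nodup := PySem.Dict.nodup_keys_counter cs
  have hget? : d0.get? 'J' = some ((cs.count 'J' : Int)) := by
    apply PySem.Dict.get?_of_mem_items d0 _ hnodk
    rw [hitems0]
    exact List.mem_map_of_mem hJS
  have hpop : d0.pop? 'J' = some (((cs.count 'J' : Int)), d0.erase 'J') := by
    simp [PySem.Dict.pop?, hget?]
  set j : Int := (cs.count 'J' : Int) with hj
  set d1 := d0.erase 'J' with hd1
  set S' := S.filter (fun k => !(k == 'J')) with hS'
  have hvals1 : d1.values = S'.map (fun k => (cs.count k : Int)) := erase_values cs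
  have hitems1 : d1.items = S'.map (fun k => (k, (cs.count k : Int))) := by
    show d0.items.filter _ = _
    rw [hitems0, List.filter_map]; rfl
  have hkeys1 : d1.keys = S' := by
    show d1.items.map Prod.fst = S'
    rw [hitems1, List.map_map,
      show (Prod.fst ∘ fun k : Char => (k, (cs.count k : Int))) = fun k => k from rfl]
    exact List.map_id _
  have hS'nd : S'.Nodup := hSnd.filter _
  have hnodk1 : d1.keys.Nodup := by rw [hkeys1]; exact hS'nd
  obtain ⟨c0, hc0cs, hc0ne⟩ := hex
  have hc0S' : c0 ∈ S' := by
    rw [hS', List.mem_filter]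
    exact ⟨(PySem.Set.mem_ofList cs c0).mpr hc0cs, by simpa using hc0ne⟩
  obtain ⟨a, hmax⟩ : ∃ a, PySem.List.max? d1.keys (fun k => d1.getD k 0) = some a := by
    cases h : PySem.List.max? d1.keys (fun k => d1.getD k 0) with
    | none =>
        exfalso
        have := (PySem.List.max?_eq_none_iff _ _).mp h
        rw [hkeys1] at this
        rw [this] at hc0S'
        simp at hc0S'
    | some a => exact ⟨a, rfl⟩
  have haS' : a ∈ S' := by
    have := PySem.List.max?_mem hmax
    rwa [hkeys1] at this
  have haJ : a ≠ 'J' := by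
    have := (List.mem_filter.mp (hS' ▸ haS')).2
    simpa using this
  have hacs : a ∈ cs := (PySem.Set.mem_ofList cs a).mp (List.mem_filter.mp (hS' ▸ haS')).1
  have hgetmem : ∀ k ∈ S', d1.getD k 0 = (cs.count k : Int) := by
    intro k hk
    exact PySem.Dict.getD_of_mem_items d1
      (by rw [hitems1]; exact List.mem_map_of_mem hk) hnodk1 0
  set mN : Nat := cs.count a with hmdef
  have hgeta : d1.getD a 0 = (mN : Int) := hgetmem a haS'
  have hmmax : ∀ y ∈ d1.values, y ≤ (mN : Int) := by
    intro y hy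
    rw [hvals1, List.mem_map] at hy
    obtain ⟨k, hk, rfl⟩ := hy
    have := PySem.List.max?_isMax hmax k (by rwa [hkeys1])
    rwa [hgetmem k hk, hgeta] at this
  obtain ⟨P, Q, hPQ, haP, haQ⟩ := split_at_mem haS' hS'nd
  have hvalsA : (d1.modify a 0 (· + j)).values =
      P.map (fun k => (cs.count k : Int)) ++ ((mN : Int) + j) ::
        Q.map (fun k => (cs.count k : Int)) := by
    show ((d1.insert a (d1.getD a 0 + j)).items).map Prod.snd = _
    rw [hgeta, PySem.Dict.items_insert_of_contains d1 _
      ((PySem.Dict.contains_iff_mem_keys d1 a).mpr (by rwa [hkeys1])),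
      hitems1, hPQ]
    simp only [List.map_append, List.map_cons, List.map_map]
    congr 1
    · apply List.map_congr_left
      intro k hk
      have hka : (k == a) = false := by
        simpa using fun h : k = a => haP (by rw [h] at hk; exact hk)
      simp [Function.comp, hka]
    · congr 1
      · simp
      · apply List.map_congr_left
        intro k hk
        have hka : (k == a) = false := by
          simpa using fun h : k = a => haQ (by rw [h] at hk; exact hk)
        simp [Function.comp, hka]
  have hvals1' : d1.values =
      P.map (fun k => (cs.count k : Int)) ++ (mN : Int) ::
        Q.map (fun k => (cs.count k : Int)) := by
    rw [hvals1, hPQ]; simp [hmdef]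
  have hmerged : (mergeA d0 true).values = (d1.modify a 0 (· + j)).values := by
    unfold mergeA
    have hg5 : (((cs.count 'J' : Nat) : Int) == (5 : Int)) = false := by
      simp only [beq_eq_false_iff_ne, ne_eq]
      exact_mod_cast hj5
    have hgetD : d0.getD 'J' 0 = ((cs.count 'J' : Nat) : Int) := by
      rw [hd0]; exact PySem.Dict.getD_counter cs 'J'
    rw [hcont, hgetD, hg5]
    simp only [Bool.and_true, Bool.not_false, if_true]
    rw [hpop]
    show (match PySem.List.max? d1.keys (fun k => d1.getD k 0) with
          | some maxKey => d1.modify maxKey 0 (· + j)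
          | none => d1).values = (d1.modify a 0 (· + j)).values
    rw [hmax]
  refine ⟨mN, P.map (fun k => (cs.count k : Int)) ++ Q.map (fun k => (cs.count k : Int)),
    ?_, ⟨a, hacs, haJ, hmdef⟩, hmmax, ?_, ?_⟩
  · have : 0 < cs.count a := List.count_pos_iff.mpr hacs
    omega
  · rw [hvals1']
    exact List.perm_middle
  · rw [hmerged, hvalsA]
    exact List.perm_middle

-- ===== VERDICT (by name: the statement is the Claim_ definition above) =====
theorem encode_hand_to_int_spec : Claim_equal_encode_hand_to_int := by
  intro hand p2 _ hpre
  obtain ⟨hcards, hallJ⟩ := hpre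
  have hcards' : ∀ c ∈ hand.toList,
      c ∈ ['2','3','4','5','6','7','8','9','T','J','Q','K','A'] := by
    intro c hc
    simpa using List.all_eq_true.mp hcards c hc
  unfold Spec_encode_hand_to_int
  simp only [encode_hand_to_int, encode_hand_to_int_alt, countsA_eq_counter]
  set cs := hand.toList with hcs
  -- digits: A's enumerate/power loop is B's Horner fold
  have henum := enum_fold_eq_horner (fun c => cardValueA c p2) cs.length cs 0
      (typeScoreA (mergeA (PySem.Dict.counter cs) p2).values) (by omega)
  rw [show ((0 : Nat) : Int) = (0 : Int) from rfl] at henum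
  rw [henum]
  simp only [Nat.sub_zero, Nat.sub_self, pow_zero, mul_one]
  have hfold : cs.foldl (fun acc c => acc * 100 + cardValueA c p2) 0 =
      cs.foldl (fun acc c => acc * 100 +
        (valDictB (if p2 then "J23456789TQKA".toList else "23456789TJQKA".toList)).getD c 0) 0 := by
    apply PySem.List.foldl_congr_mem
    intro acc x hx
    rw [card_digits_eq p2 (hcards' x hx)]
  rw [hfold]
  -- ranks
  obtain ⟨hruns, hj⟩ := runs_perm cs
  rw [hj]
  set jN := cs.count 'J' with hjN
  set R := (scanRuns (PySem.List.sorted cs (fun c => c) false)).1 with hR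
  by_cases hW : p2 = true ∧ jN ≠ 0 ∧ jN ≠ 5
  · -- wild: both sides merge the jokers into the biggest group
    obtain ⟨hp2, h0, h5⟩ := hW
    subst hp2
    have hJm : 'J' ∈ cs := by rw [← List.count_pos_iff]; omega
    have hex : ∃ c ∈ cs, c ≠ 'J' := by
      by_contra hno
      push_neg at hno
      have hall : cs.count 'J' = cs.length :=
        List.count_eq_length.mpr (fun b hb => (hno b hb).symm)
      have hne : cs ≠ [] := by
        intro h; rw [h] at hJm; simp at hJm
      exact hallJ ⟨rfl, hne, hall, fun h => h5 (hall.trans h)⟩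
    obtain ⟨mN, rest, hm1, _, hub, hpermd, hpermV⟩ := mergeA_wild cs h0 h5 hex
    rw [← hjN] at hpermV
    -- B's guard fires
    have hg0 : ((jN : Int) == 0) = false := by
      simp only [beq_eq_false_iff_ne, ne_eq]
      exact_mod_cast h0
    have hg5 : ((jN : Int) == 5) = false := by
      simp only [beq_eq_false_iff_ne, ne_eq]
      exact_mod_cast h5
    -- the joker run is a member of the runs list
    have hjmem : ((jN : Int)) ∈ R :=
      hruns.mem_iff.mpr ((counter_erase_perm cs hJm).symm.subset List.mem_cons_self)
    have hrs : (R.erase (jN : Int)).Perm ((PySem.Dict.counter cs).erase 'J').values := by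
      refine (hruns.erase _).trans ?_
      have h1 := (counter_erase_perm cs hJm).erase ((jN : Int))
      rwa [List.erase_cons_head] at h1
    -- the maximum of the remaining runs is mN
    have hmNmem : ((mN : Int)) ∈ R.erase (jN : Int) :=
      hrs.symm.subset (hpermd.symm.subset List.mem_cons_self)
    obtain ⟨mB, hmax⟩ : ∃ mB, PySem.List.max? (R.erase (jN : Int)) (fun v => v) = some mB := by
      cases h : PySem.List.max? (R.erase (jN : Int)) (fun v => v) with
      | none =>
          exfalso
          rw [(PySem.List.max?_eq_none_iff _ _).mp h] at hmNmem
          simp at hmNmem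
      | some mB => exact ⟨mB, rfl⟩
    have hmBeq : mB = (mN : Int) := by
      have hle1 : mB ≤ (mN : Int) :=
        hub _ (hrs.subset (PySem.List.max?_mem hmax))
      have hle2 : (mN : Int) ≤ mB := PySem.List.max?_isMax hmax _ hmNmem
      omega
    subst hmBeq
    -- B's surgery equals A's merged value multiset
    have hmr : mergeRunsB R (jN : Int) true =
        (R.erase (jN : Int)).set
          ((PySem.List.index? (R.erase (jN : Int)) ((mN : Int))).getD 0)
          (((mN : Int)) + (jN : Int)) := by
      unfold mergeRunsB
      rw [hg0, hg5]
      simp only [Bool.not_false, Bool.and_self, Bool.true_and, if_true]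
      rw [PySem.List.remove?_eq_some_erase _ _ hjmem]
      simp only [hmax, Option.getD_some]
    have hfinal : (mergeA (PySem.Dict.counter cs) true).values.Perm
        (mergeRunsB R (jN : Int) true) := by
      rw [hmr]
      refine hpermV.trans ?_
      have h1 := set_index_perm (R.erase (jN : Int)) ((mN : Int)) (((mN : Int)) + (jN : Int))
        (PySem.List.max?_mem hmax)
      refine List.Perm.trans ?_ h1.symm
      have h2 : ((R.erase (jN : Int)).erase ((mN : Int))).Perm rest := by
        refine ((hrs.erase _).trans ?_)
        have h3 := hpermd.erase ((mN : Int))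
        rwa [List.erase_cons_head] at h3
      exact (h2.symm.cons _)
    rw [typeScore_eq_rankB hfinal]
  · -- no merge on either side
    have hmr : mergeRunsB R (jN : Int) p2 = R := by
      unfold mergeRunsB
      have hguard : (p2 && !((jN : Int) == 0) && !((jN : Int) == 5)) = false := by
        by_cases hp : p2 = true
        · subst hp
          have h05 : jN = 0 ∨ jN = 5 := by tauto
          rcases h05 with h | h <;> rw [h] <;> simp
        · have hp' : p2 = false := by simpa using hp
          simp [hp']
      rw [hguard]
      simp
    rw [hmr]
    have hmerge : mergeA (PySem.Dict.counter cs) p2 = PySem.Dict.counter cs := by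
      unfold mergeA
      have hguard : (p2 && (PySem.Dict.counter cs).contains 'J'
          && !((PySem.Dict.counter cs).getD 'J' 0 == 5)) = false := by
        rw [PySem.Dict.contains_counter, PySem.Dict.getD_counter]
        by_cases hp : p2 = true
        · subst hp
          have h05 : jN = 0 ∨ jN = 5 := by tauto
          rcases h05 with h | h
          · have hnm : 'J' ∉ cs := by
              intro hmem
              have := List.count_pos_iff.mpr hmem
              omega
            simp [hnm]
          · rw [← hjN, h]; simp
        · have hp' : p2 = false := by simpa using hp
          simp [hp']
      rw [hguard]
      simp
    rw [hmerge, typeScore_eq_rankB hruns.symm]
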